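-- pv_equiv track=rewrite | github.com/NicolasFluxa/Python-God-Mode | Tarea01/P1AUX2.py | calcular_numero_binomial
-- ===== SOURCE A (Python) =====
-- import math  # Importamos la biblioteca math para usar la función factorial.
--
-- def calcular_numero_binomial(n):  # Esta función genera el Triángulo de Pascal hasta la fila n.
--     # Inicializamos una lista vacía para almacenar las filas del triángulo.
--     triangulo = []
--     # Iteramos desde 0 hasta n.
--     for aux in range(n+1):
--         # Inicializamos una lista vacía para almacenar los números de la fila actual.
--         fila = []
--         # Iteramos desde 0 hasta aux.
--         for k in range(0, aux + 1):
--             # Calculamos el coeficiente binomial (aux choose k)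
--             # utilizando la fórmula del coeficiente binomial y la función factorial de la biblioteca math.
--             # Añadimos el coeficiente binomial a la fila actual.
--             fila.append(math.comb(n, k))
--         # Añadimos la fila al triángulo.
--         triangulo.append(fila)
--     # Devolvemos el triángulo completo.
--     return triangulo
-- ===== SOURCE B (Python) =====
-- def calcular_numero_binomial(n):
--     # One incremental pass computes C(n,0..n); rows are prefixes of that single row.
--     if n < 0:
--         return []
--     row = [1]
--     c = 1
--     for k in range(n):
--         c = c * (n - k) // (k + 1)
--         row.append(c)
--     return [row[:i + 1] for i in range(n + 1)]
-- ===== Notes on version B (the rewrite author's own statement) =====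
-- stated objective: faster
-- what changed: B computes the single row C(n,0..n) once with the multiplicative recurrence c = c*(n-k)//(k+1) and emits each triangle row as a prefix slice, instead of evaluating math.comb for every cell; intended as faster (measured 37.7x at the largest size both finished; on huge n both time out since the output itself is O(n^2)).
import Mathlib
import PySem

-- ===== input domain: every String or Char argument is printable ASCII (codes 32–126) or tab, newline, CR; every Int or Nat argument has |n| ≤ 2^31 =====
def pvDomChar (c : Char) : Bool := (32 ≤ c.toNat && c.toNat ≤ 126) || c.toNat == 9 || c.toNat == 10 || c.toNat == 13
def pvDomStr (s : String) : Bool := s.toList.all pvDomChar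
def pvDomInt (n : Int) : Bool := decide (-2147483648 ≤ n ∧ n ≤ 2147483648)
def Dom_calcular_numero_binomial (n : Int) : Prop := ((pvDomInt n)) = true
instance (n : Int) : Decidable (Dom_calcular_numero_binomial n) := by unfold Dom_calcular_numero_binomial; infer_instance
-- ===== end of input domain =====

-- B builds the single row C(n,0..n) once by the multiplicative recurrence and emits each
-- triangle row as a prefix slice, instead of A's math.comb evaluation for every cell (intended as faster; measured 37.7x at the
-- largest size both programs finished in a timing run).

-- ===== PORT A =====
-- math.comb(n, k); exact for 0 ≤ n and 0 ≤ k, which covers every call the loops make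
-- (the outer loop is empty when n < 0, and both loop variables are nonnegative).
def pyComb (n k : Int) : Int := ((n.toNat.choose k.toNat : Nat) : Int)

def calcular_numero_binomial (n : Int) : List (List Int) :=
  (PySem.List.pyRange 0 (n + 1) 1).foldl
    (fun triangulo aux =>
      triangulo ++
        [(PySem.List.pyRange 0 (aux + 1) 1).foldl (fun fila k => fila ++ [pyComb n k]) []])
    []

-- ===== PORT B =====
def calcular_numero_binomial_alt (n : Int) : List (List Int) :=
  if n < 0 then []
  else
    let st : List Int × Int :=
      (PySem.List.pyRange 0 n 1).foldl
        (fun (st : List Int × Int) k =>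
          let c := PySem.Int.floordiv (st.2 * (n - k)) (k + 1)
          (st.1 ++ [c], c))
        ([1], 1)
    (PySem.List.pyRange 0 (n + 1) 1).map
      (fun i => PySem.List.slice st.1 none (some (i + 1)))

-- ===== PRECONDITION & SPEC =====
def Spec_calcular_numero_binomial (n : Int) (out : List (List Int)) : Prop := out = calcular_numero_binomial_alt n
instance (n : Int) (out : List (List Int)) : Decidable (Spec_calcular_numero_binomial n out) := by unfold Spec_calcular_numero_binomial; infer_instance

-- ===== CLAIM (what is proved, stated in full; the proofs are below) =====
def Claim_equal_calcular_numero_binomial : Prop := ∀ (n : Int), Dom_calcular_numero_binomial n → Spec_calcular_numero_binomial n (calcular_numero_binomial n)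

-- ===== LEMMAS AND PROOFS =====

-- appending one element at a time is init ++ map
theorem foldl_append_singleton {α β : Type} (f : α → β) (l : List α) (init : List β) :
    l.foldl (fun acc x => acc ++ [f x]) init = init ++ l.map f := by
  induction l generalizing init with
  | nil => simp
  | cons x xs ih => simp [List.foldl_cons, ih, List.append_assoc]

-- the one multiplicative step: c * (n-m) // (m+1) advances C(n,m) to C(n,m+1)
theorem floordiv_choose_step (n m : Nat) (h : m < n) :
    PySem.Int.floordiv ((n.choose m : Int) * ((n : Int) - (m : Int))) ((m : Int) + 1)
      = (n.choose (m + 1) : Int) := by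
  have hnm : (n : Int) - (m : Int) = ((n - m : Nat) : Int) := by
    omega
  rw [hnm]
  have h1 : (n.choose m : Int) * ((n - m : Nat) : Int) = ((n.choose m * (n - m) : Nat) : Int) := by
    push_cast; ring
  have h2 : ((m : Int) + 1) = ((m + 1 : Nat) : Int) := by push_cast; ring
  rw [h1, h2, PySem.Int.floordiv_natCast]
  congr 1
  rw [← Nat.choose_succ_right_eq]
  exact Nat.mul_div_cancel _ (Nat.succ_pos m)

-- invariant of B's row-building loop
theorem rowB_invariant (n m : Nat) (hm : m ≤ n) :
    (PySem.List.pyRange 0 (m : Int) 1).foldl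
      (fun (st : List Int × Int) k =>
        ((st.1 ++ [PySem.Int.floordiv (st.2 * ((n : Int) - k)) (k + 1)]),
          PySem.Int.floordiv (st.2 * ((n : Int) - k)) (k + 1)))
      ([1], 1)
      = ((List.range (m + 1)).map (fun k => (n.choose k : Int)), (n.choose m : Int)) := by
  induction m with
  | zero =>
    simp [PySem.List.pyRange_one_eq_nil (by omega : (0:Int) ≤ 0)]
  | succ m ih =>
    have hm' : m ≤ n := Nat.le_of_succ_le hm
    rw [show ((m + 1 : Nat) : Int) = (m : Int) + 1 by push_cast; ring,
      PySem.List.pyRange_one_succ_right (by positivity), List.foldl_append, ih hm']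
    simp only [List.foldl_cons, List.foldl_nil]
    rw [floordiv_choose_step n m hm]
    rw [List.range_succ (n := m + 1), List.map_append]
    simp

-- A's inner loop produces the k-th prefix row directly
theorem rowA_eq (n : Int) (aux : Nat) :
    (PySem.List.pyRange 0 ((aux : Int) + 1) 1).foldl (fun fila k => fila ++ [pyComb n k]) []
      = (List.range (aux + 1)).map (fun k => (n.toNat.choose k : Int)) := by
  rw [show ((aux : Int) + 1) = ((aux + 1 : Nat) : Int) by push_cast; ring,
    PySem.List.pyRange_zero_nat, foldl_append_singleton, List.nil_append, List.map_map]
  refine List.map_congr_left ?_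
  intro k _
  simp [pyComb]

-- ===== VERDICT (by name: the statement is the Claim_ definition above) =====
theorem calcular_numero_binomial_spec : Claim_equal_calcular_numero_binomial := by
  unfold Claim_equal_calcular_numero_binomial Spec_calcular_numero_binomial
  intro n _
  unfold calcular_numero_binomial calcular_numero_binomial_alt
  by_cases hneg : n < 0
  · simp [hneg, PySem.List.pyRange_one_eq_nil (by omega : n + 1 ≤ 0)]
  · rw [Int.not_lt] at hneg
    simp only [if_neg (Int.not_lt.mpr hneg)]
    obtain ⟨N, rfl⟩ : ∃ N : Nat, n = (N : Int) := ⟨n.toNat, (Int.toNat_of_nonneg hneg).symm⟩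
    rw [rowB_invariant N N le_rfl]
    rw [show ((N : Int) + 1) = ((N + 1 : Nat) : Int) by push_cast; ring,
      PySem.List.pyRange_zero_nat]
    rw [foldl_append_singleton
      (f := fun aux => (PySem.List.pyRange 0 (aux + 1) 1).foldl
        (fun fila k => fila ++ [pyComb (N : Int) k]) []) _ []]
    rw [List.nil_append, List.map_map, List.map_map]
    refine List.map_congr_left ?_
    intro i hi
    rw [Function.comp_apply, Function.comp_apply, rowA_eq]
    rw [show ((i : Int) + 1) = ((i + 1 : Nat) : Int) by push_cast; ring,
      PySem.List.slice_to_natCast, ← List.map_take, List.take_range]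
    congr 2
    simp at hi
    omega
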